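-- pv_equiv track=rewrite | github.com/pirl-unc/io-shieldbreak | scripts/build_report.py | _select_sections
-- ===== SOURCE A (Python) =====
-- INCLUDED_SECTIONS = [
--     "Top interventions",
--     "Ranked prioritization",
--     "Caveats",
--     "Sources",
-- ]
--
-- def _select_sections(sections: list[tuple[str, str]]) -> list[tuple[str, str]]:
--     out: list[tuple[str, str]] = []
--     for wanted in INCLUDED_SECTIONS:
--         for heading, body in sections:
--             if heading.startswith(wanted):
--                 out.append((heading, body))
--                 break
--     return out
-- ===== SOURCE B (Python) =====
-- INCLUDED_SECTIONS = [
--     "Top interventions",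
--     "Ranked prioritization",
--     "Caveats",
--     "Sources",
-- ]
--
-- def _select_sections(sections: list[tuple[str, str]]) -> list[tuple[str, str]]:
--     found: dict[str, tuple[str, str]] = {}
--     for heading, body in sections:
--         for wanted in INCLUDED_SECTIONS:
--             if wanted not in found and heading.startswith(wanted):
--                 found[wanted] = (heading, body)
--     return [found[w] for w in INCLUDED_SECTIONS if w in found]
-- ===== Notes on version B (the rewrite author's own statement) =====
-- stated objective: alternative
-- what changed: Replaces A's rescanning of the whole section list for every configured prefix with a single pass over the sections that records the first matching section per prefix in a dict, then emits the recorded entries in INCLUDED_SECTIONS order.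
import Mathlib
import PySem

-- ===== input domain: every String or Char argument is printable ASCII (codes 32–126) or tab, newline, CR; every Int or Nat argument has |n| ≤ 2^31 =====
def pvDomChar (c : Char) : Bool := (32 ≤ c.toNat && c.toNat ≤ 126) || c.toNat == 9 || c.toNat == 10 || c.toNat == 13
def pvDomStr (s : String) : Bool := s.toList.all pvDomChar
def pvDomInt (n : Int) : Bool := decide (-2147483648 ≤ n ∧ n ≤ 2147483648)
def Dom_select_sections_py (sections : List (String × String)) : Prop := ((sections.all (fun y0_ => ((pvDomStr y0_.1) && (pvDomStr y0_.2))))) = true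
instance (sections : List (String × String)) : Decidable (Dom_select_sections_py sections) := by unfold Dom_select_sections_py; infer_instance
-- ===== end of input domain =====

-- B replaces A's per-prefix rescans of the section list by one pass over the sections that
-- records the first matching section per prefix in a dict, then emits them in prefix order
-- (alternative decomposition, same result).


def pvIncluded : List String :=
  ["Top interventions", "Ranked prioritization", "Caveats", "Sources"]

-- ===== PORT A =====
-- inner 'for heading, body in sections: if heading.startswith(wanted): out.append(...); break'
def pvInnerA (out : List (String × String)) (wanted : String) :
    List (String × String) → List (String × String)
  | [] => out
  | (heading, body) :: rest =>
      if PySem.Str.startswith heading wanted then out ++ [(heading, body)]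
      else pvInnerA out wanted rest

def select_sections_py (sections : List (String × String)) : List (String × String) :=
  pvIncluded.foldl (fun out wanted => pvInnerA out wanted sections) []

-- ===== PORT B =====
-- inner 'for wanted in INCLUDED_SECTIONS: if wanted not in found and heading.startswith(wanted): found[wanted] = ...'
def pvStepB (found : PySem.Dict String (String × String)) (sec : String × String) :
    PySem.Dict String (String × String) :=
  pvIncluded.foldl
    (fun found wanted =>
      if (!found.contains wanted) && PySem.Str.startswith sec.1 wanted then
        found.insert wanted sec
      else found)
    found

def select_sections_py_alt (sections : List (String × String)) : List (String × String) :=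
  let found := sections.foldl pvStepB PySem.Dict.empty
  pvIncluded.filterMap (fun w => found.get? w)

-- ===== PRECONDITION & SPEC =====
def Spec_select_sections_py (sections : List (String × String)) (out : List (String × String)) : Prop := out = select_sections_py_alt sections
instance (sections : List (String × String)) (out : List (String × String)) : Decidable (Spec_select_sections_py sections out) := by unfold Spec_select_sections_py; infer_instance

-- ===== CLAIM (what is proved, stated in full; the proofs are below) =====
def Claim_equal_select_sections_py : Prop := ∀ (sections : List (String × String)), Dom_select_sections_py sections → Spec_select_sections_py sections (select_sections_py sections)

-- ===== LEMMAS AND PROOFS =====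

-- proof helper: the first section whose heading starts with w
def pvFind (w : String) : List (String × String) → Option (String × String)
  | [] => none
  | (h, b) :: rest => if PySem.Str.startswith h w then some (h, b) else pvFind w rest

lemma innerA_eq (out : List (String × String)) (w : String) (sections : List (String × String)) :
    pvInnerA out w sections = match pvFind w sections with
      | some p => out ++ [p]
      | none => out := by
  induction sections with
  | nil => rfl
  | cons s rest ih =>
    obtain ⟨h, b⟩ := s
    simp only [pvInnerA, pvFind]
    split_ifs <;> simp [ih]

lemma stepB_get (d : PySem.Dict String (String × String)) (s : String × String)
    (w : String) (hw : w ∈ pvIncluded) :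
    (pvStepB d s).get? w =
      if (d.get? w).isNone ∧ PySem.Str.startswith s.1 w then some s else d.get? w := by
  fin_cases hw <;>
  · simp only [pvStepB, pvIncluded, List.foldl_cons, List.foldl_nil,
      PySem.Dict.contains_eq_isSome_get?]
    split_ifs <;>
      simp_all [PySem.Dict.get?_insert_self, PySem.Dict.get?_insert_of_ne,
        Option.isNone_iff_eq_none]

lemma foldl_stepB_get (w : String) (hw : w ∈ pvIncluded) :
    ∀ (sections : List (String × String)) (d : PySem.Dict String (String × String)),
      (sections.foldl pvStepB d).get? w =
        match d.get? w with
        | some v => some v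
        | none => pvFind w sections := by
  intro sections
  induction sections with
  | nil => intro d; simp only [List.foldl_nil]; cases d.get? w <;> rfl
  | cons s rest ih =>
    intro d
    simp only [List.foldl_cons, ih, stepB_get d s w hw, pvFind]
    obtain ⟨h, b⟩ := s
    cases hd : d.get? w <;> split_ifs <;> simp_all

lemma found_get (sections : List (String × String)) (w : String) (hw : w ∈ pvIncluded) :
    (sections.foldl pvStepB PySem.Dict.empty).get? w = pvFind w sections := by
  rw [foldl_stepB_get w hw sections PySem.Dict.empty]
  rfl

-- ===== VERDICT (by name: the statement is the Claim_ definition above) =====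
theorem select_sections_py_spec : Claim_equal_select_sections_py := by
  intro sections _
  show select_sections_py sections = select_sections_py_alt sections
  simp only [select_sections_py, select_sections_py_alt]
  have hget : ∀ w ∈ pvIncluded,
      (sections.foldl pvStepB PySem.Dict.empty).get? w = pvFind w sections :=
    fun w hw => found_get sections w hw
  simp only [pvIncluded] at hget ⊢
  simp only [List.foldl_cons, List.foldl_nil, List.filterMap_cons, List.filterMap_nil,
    innerA_eq]
  rw [hget "Top interventions" (by simp), hget "Ranked prioritization" (by simp),
    hget "Caveats" (by simp), hget "Sources" (by simp)]
  cases pvFind "Top interventions" sections <;>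
    cases pvFind "Ranked prioritization" sections <;>
    cases pvFind "Caveats" sections <;>
    cases pvFind "Sources" sections <;> simp
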